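-- pv_equiv track=rewrite | github.com/tuttlebr/facedetect | workspace/utils.py | parse_descriptors
-- ===== SOURCE A (Python) =====
-- def parse_descriptors(image_points):
--     i = 0
--     chin = {}
--     eyebrows = {}
--     nose = {}
--     eyes = {}
--     mouth = {}
--     lips = {}
--     pupil = {}
--     ears = {}
--
--     for coordinate in image_points:
--         if i < 17:
--             chin[i] = {"x": int(coordinate[0]), "y": int(coordinate[1])}
--         elif i < 27:
--             eyebrows[i] = {"x": int(coordinate[0]), "y": int(coordinate[1])}
--         elif i < 36:
--             nose[i] = {"x": int(coordinate[0]), "y": int(coordinate[1])}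
--         elif i < 48:
--             eyes[i] = {"x": int(coordinate[0]), "y": int(coordinate[1])}
--         elif i < 61:
--             mouth[i] = {"x": int(coordinate[0]), "y": int(coordinate[1])}
--         elif i < 68:
--             lips[i] = {"x": int(coordinate[0]), "y": int(coordinate[1])}
--         elif i < 76:
--             pupil[i] = {"x": int(coordinate[0]), "y": int(coordinate[1])}
--         elif i < 80:
--             ears[i] = {"x": int(coordinate[0]), "y": int(coordinate[1])}
--         elif i < 104:
--             # Additional eye descriptors.
--             eyes[i] = {"x": int(coordinate[0]), "y": int(coordinate[1])}
--         i += 1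
--
--     descriptor_points = {"chin": chin,
--                          "eyebrows": eyebrows,
--                          "nose": nose,
--                          "eyes": eyes,
--                          "mouth": mouth,
--                          "lips": lips,
--                          "pupil": pupil,
--                          "ears": ears
--                          }
--     return descriptor_points
-- ===== SOURCE B (Python) =====
-- def parse_descriptors(image_points):
--     def region(lo, hi):
--         return {lo + i: {"x": int(c[0]), "y": int(c[1])}
--                 for i, c in enumerate(image_points[lo:hi])}
--     eyes = region(36, 48)
--     eyes.update(region(80, 104))
--     return {"chin": region(0, 17),
--             "eyebrows": region(17, 27),
--             "nose": region(27, 36),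
--             "eyes": eyes,
--             "mouth": region(48, 61),
--             "lips": region(61, 68),
--             "pupil": region(68, 76),
--             "ears": region(76, 80)}
-- ===== Notes on version B (the rewrite author's own statement) =====
-- stated objective: simpler
-- what changed: Replaces A's single pass with a running counter and a 9-way if/elif dispatch by eight independent dict comprehensions over slices of the input (image_points[lo:hi] per named region; the two eye ranges are two slices merged with dict.update), so no per-item branching or counter exists at all.
import Mathlib
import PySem

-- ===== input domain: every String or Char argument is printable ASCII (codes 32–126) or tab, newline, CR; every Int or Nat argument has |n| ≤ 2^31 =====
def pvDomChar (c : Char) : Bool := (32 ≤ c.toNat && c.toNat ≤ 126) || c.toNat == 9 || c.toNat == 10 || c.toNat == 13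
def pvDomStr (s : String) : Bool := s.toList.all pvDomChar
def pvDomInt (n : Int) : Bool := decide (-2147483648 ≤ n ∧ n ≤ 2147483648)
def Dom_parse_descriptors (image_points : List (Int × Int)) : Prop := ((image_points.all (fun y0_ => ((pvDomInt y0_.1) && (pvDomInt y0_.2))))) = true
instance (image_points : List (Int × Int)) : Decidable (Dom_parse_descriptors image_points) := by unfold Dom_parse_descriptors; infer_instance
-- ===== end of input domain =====

-- B drops A's single pass with a counter and a 9-way branch entirely: each named region is
-- built independently as a dict comprehension over a SLICE of the input (eyes = two slices,
-- merged with dict.update) — staged slicing instead of per-item dispatch (objective: simpler).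

-- ===== PORT A =====

-- {"x": int(c[0]), "y": int(c[1])}  (int() on an int is the identity)
def pvPt (c : Int × Int) : List (String × Int) := [("x", c.1), ("y", c.2)]

-- A's loop: counter i and the eight category dicts; at the end the result dict literal.
def pdLoopA (pts : List (Int × Int)) (i : Int)
    (chin eyebrows nose eyes mouth lips pupil ears : PySem.Dict Int (List (String × Int))) :
    List (String × List (Int × List (String × Int))) :=
  match pts with
  | [] => [("chin", chin.items), ("eyebrows", eyebrows.items), ("nose", nose.items),
           ("eyes", eyes.items), ("mouth", mouth.items), ("lips", lips.items),
           ("pupil", pupil.items), ("ears", ears.items)]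
  | c :: rest =>
    if i < 17 then pdLoopA rest (i+1) (chin.insert i (pvPt c)) eyebrows nose eyes mouth lips pupil ears
    else if i < 27 then pdLoopA rest (i+1) chin (eyebrows.insert i (pvPt c)) nose eyes mouth lips pupil ears
    else if i < 36 then pdLoopA rest (i+1) chin eyebrows (nose.insert i (pvPt c)) eyes mouth lips pupil ears
    else if i < 48 then pdLoopA rest (i+1) chin eyebrows nose (eyes.insert i (pvPt c)) mouth lips pupil ears
    else if i < 61 then pdLoopA rest (i+1) chin eyebrows nose eyes (mouth.insert i (pvPt c)) lips pupil ears
    else if i < 68 then pdLoopA rest (i+1) chin eyebrows nose eyes mouth (lips.insert i (pvPt c)) pupil ears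
    else if i < 76 then pdLoopA rest (i+1) chin eyebrows nose eyes mouth lips (pupil.insert i (pvPt c)) ears
    else if i < 80 then pdLoopA rest (i+1) chin eyebrows nose eyes mouth lips pupil (ears.insert i (pvPt c))
    else if i < 104 then pdLoopA rest (i+1) chin eyebrows nose (eyes.insert i (pvPt c)) mouth lips pupil ears
    else pdLoopA rest (i+1) chin eyebrows nose eyes mouth lips pupil ears

def parse_descriptors (image_points : List (Int × Int)) : List (String × List (Int × List (String × Int))) :=
  pdLoopA image_points 0 PySem.Dict.empty PySem.Dict.empty PySem.Dict.empty PySem.Dict.empty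
    PySem.Dict.empty PySem.Dict.empty PySem.Dict.empty PySem.Dict.empty

-- ===== PORT B =====

-- {"x": int(c[0]), "y": int(c[1])}
def pvPtB (c : Int × Int) : List (String × Int) := [("x", c.1), ("y", c.2)]

-- region(lo, hi) = {lo + i: {...} for i, c in enumerate(image_points[lo:hi])}
-- (a dict comprehension is sequential insertion = Dict.ofList; the slice is PySem.List.slice)
def pvRegion (image_points : List (Int × Int)) (lo hi : Int) : PySem.Dict Int (List (String × Int)) :=
  PySem.Dict.ofList
    ((PySem.List.enumerate (PySem.List.slice image_points (some lo) (some hi)) 0).map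
      (fun p => (lo + p.1, pvPtB p.2)))

def parse_descriptors_alt (image_points : List (Int × Int)) : List (String × List (Int × List (String × Int))) :=
  [("chin", (pvRegion image_points 0 17).items),
   ("eyebrows", (pvRegion image_points 17 27).items),
   ("nose", (pvRegion image_points 27 36).items),
   ("eyes", ((pvRegion image_points 36 48).update (pvRegion image_points 80 104).items).items),
   ("mouth", (pvRegion image_points 48 61).items),
   ("lips", (pvRegion image_points 61 68).items),
   ("pupil", (pvRegion image_points 68 76).items),
   ("ears", (pvRegion image_points 76 80).items)]

-- ===== PRECONDITION & SPEC =====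
def Spec_parse_descriptors (image_points : List (Int × Int)) (out : List (String × List (Int × List (String × Int)))) : Prop := out = parse_descriptors_alt image_points
instance (image_points : List (Int × Int)) (out : List (String × List (Int × List (String × Int)))) : Decidable (Spec_parse_descriptors image_points out) := by unfold Spec_parse_descriptors; infer_instance

-- ===== CLAIM (what is proved, stated in full; the proofs are below) =====
def Claim_equal_parse_descriptors : Prop := ∀ (image_points : List (Int × Int)), Dom_parse_descriptors image_points → Spec_parse_descriptors image_points (parse_descriptors image_points)

-- ===== LEMMAS AND PROOFS =====

def pvF (p : Int × (Int × Int)) : Int × List (String × Int) := (p.1, pvPt p.2)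

lemma pvKeysLt_insert {ν : Type} {d : PySem.Dict Int ν} {n : Int} (v : ν)
    (h : ∀ k ∈ d.keys, k < n) : ∀ k ∈ (d.insert n v).keys, k < n + 1 := by
  intro k hk
  rcases (PySem.Dict.mem_keys_insert d n k v).1 hk with rfl | hk
  · omega
  · have := h k hk; omega

lemma pvKeysLt_succ {ν : Type} {d : PySem.Dict Int ν} {n : Int}
    (h : ∀ k ∈ d.keys, k < n) : ∀ k ∈ d.keys, k < n + 1 := by
  intro k hk; have := h k hk; omega

lemma pvNotContains {ν : Type} {d : PySem.Dict Int ν} {n : Int}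
    (h : ∀ k ∈ d.keys, k < n) : d.contains n = false := by
  rw [Bool.eq_false_iff]
  intro hc
  have := h n ((PySem.Dict.contains_iff_mem_keys d n).1 hc)
  omega

lemma pvLoopA_eq (pts : List (Int × Int)) (n : Int) (hn : 0 ≤ n)
    (c eb no_ ey mo li pu ea : PySem.Dict Int (List (String × Int)))
    (hc : ∀ k ∈ c.keys, k < n)
    (heb : ∀ k ∈ eb.keys, k < n)
    (hno_ : ∀ k ∈ no_.keys, k < n)
    (hey : ∀ k ∈ ey.keys, k < n)
    (hmo : ∀ k ∈ mo.keys, k < n)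
    (hli : ∀ k ∈ li.keys, k < n)
    (hpu : ∀ k ∈ pu.keys, k < n)
    (hea : ∀ k ∈ ea.keys, k < n)
    :
    pdLoopA pts n c eb no_ ey mo li pu ea =
    [("chin", c.items ++ ((PySem.List.enumerate pts n).filter (fun p => decide (0 ≤ p.1 ∧ p.1 < 17))).map pvF), ("eyebrows", eb.items ++ ((PySem.List.enumerate pts n).filter (fun p => decide (17 ≤ p.1 ∧ p.1 < 27))).map pvF), ("nose", no_.items ++ ((PySem.List.enumerate pts n).filter (fun p => decide (27 ≤ p.1 ∧ p.1 < 36))).map pvF), ("eyes", ey.items ++ ((PySem.List.enumerate pts n).filter (fun p => decide ((36 ≤ p.1 ∧ p.1 < 48) ∨ (80 ≤ p.1 ∧ p.1 < 104)))).map pvF), ("mouth", mo.items ++ ((PySem.List.enumerate pts n).filter (fun p => decide (48 ≤ p.1 ∧ p.1 < 61))).map pvF), ("lips", li.items ++ ((PySem.List.enumerate pts n).filter (fun p => decide (61 ≤ p.1 ∧ p.1 < 68))).map pvF), ("pupil", pu.items ++ ((PySem.List.enumerate pts n).filter (fun p => decide (68 ≤ p.1 ∧ p.1 < 76))).map pvF),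 ("ears", ea.items ++ ((PySem.List.enumerate pts n).filter (fun p => decide (76 ≤ p.1 ∧ p.1 < 80))).map pvF)] := by
  induction pts generalizing n c eb no_ ey mo li pu ea hc heb hno_ hey hmo hli hpu hea with
  | nil => simp [pdLoopA, PySem.List.enumerate_nil]
  | cons q rest ih =>
    by_cases h0 : n < 17
    · simp only [pdLoopA]
      rw [if_pos h0]
      rw [ih (n+1) (by omega) (c.insert n (pvPt q)) eb no_ ey mo li pu ea (pvKeysLt_insert _ hc) (pvKeysLt_succ heb) (pvKeysLt_succ hno_) (pvKeysLt_succ hey) (pvKeysLt_succ hmo) (pvKeysLt_succ hli) (pvKeysLt_succ hpu) (pvKeysLt_succ hea)]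
      rw [PySem.Dict.items_insert_of_not_contains _ _ (pvNotContains hc)]
      rw [PySem.List.enumerate_cons]
      simp [pvF, List.append_assoc, show 0 ≤ n ∧ n < 17 by omega, show ¬(17 ≤ n ∧ n < 27) by omega, show ¬(27 ≤ n ∧ n < 36) by omega, show ¬((36 ≤ n ∧ n < 48) ∨ (80 ≤ n ∧ n < 104)) by omega, show ¬(48 ≤ n ∧ n < 61) by omega, show ¬(61 ≤ n ∧ n < 68) by omega, show ¬(68 ≤ n ∧ n < 76) by omega, show ¬(76 ≤ n ∧ n < 80) by omega]
    by_cases h1 : n < 27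
    · simp only [pdLoopA]
      rw [if_neg h0, if_pos h1]
      rw [ih (n+1) (by omega) c (eb.insert n (pvPt q)) no_ ey mo li pu ea (pvKeysLt_succ hc) (pvKeysLt_insert _ heb) (pvKeysLt_succ hno_) (pvKeysLt_succ hey) (pvKeysLt_succ hmo) (pvKeysLt_succ hli) (pvKeysLt_succ hpu) (pvKeysLt_succ hea)]
      rw [PySem.Dict.items_insert_of_not_contains _ _ (pvNotContains heb)]
      rw [PySem.List.enumerate_cons]
      simp [pvF, List.append_assoc, show ¬(0 ≤ n ∧ n < 17) by omega, show 17 ≤ n ∧ n < 27 by omega, show ¬(27 ≤ n ∧ n < 36) by omega, show ¬((36 ≤ n ∧ n < 48) ∨ (80 ≤ n ∧ n < 104)) by omega, show ¬(48 ≤ n ∧ n < 61) by omega, show ¬(61 ≤ n ∧ n < 68) by omega, show ¬(68 ≤ n ∧ n < 76) by omega, show ¬(76 ≤ n ∧ n < 80) by omega]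
    by_cases h2 : n < 36
    · simp only [pdLoopA]
      rw [if_neg h0, if_neg h1, if_pos h2]
      rw [ih (n+1) (by omega) c eb (no_.insert n (pvPt q)) ey mo li pu ea (pvKeysLt_succ hc) (pvKeysLt_succ heb) (pvKeysLt_insert _ hno_) (pvKeysLt_succ hey) (pvKeysLt_succ hmo) (pvKeysLt_succ hli) (pvKeysLt_succ hpu) (pvKeysLt_succ hea)]
      rw [PySem.Dict.items_insert_of_not_contains _ _ (pvNotContains hno_)]
      rw [PySem.List.enumerate_cons]
      simp [pvF, List.append_assoc, show ¬(0 ≤ n ∧ n < 17) by omega, show ¬(17 ≤ n ∧ n < 27) by omega, show 27 ≤ n ∧ n < 36 by omega, show ¬((36 ≤ n ∧ n < 48) ∨ (80 ≤ n ∧ n < 104)) by omega, show ¬(48 ≤ n ∧ n < 61) by omega, show ¬(61 ≤ n ∧ n < 68) by omega, show ¬(68 ≤ n ∧ n < 76) by omega, show ¬(76 ≤ n ∧ n < 80) by omega]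
    by_cases h3 : n < 48
    · simp only [pdLoopA]
      rw [if_neg h0, if_neg h1, if_neg h2, if_pos h3]
      rw [ih (n+1) (by omega) c eb no_ (ey.insert n (pvPt q)) mo li pu ea (pvKeysLt_succ hc) (pvKeysLt_succ heb) (pvKeysLt_succ hno_) (pvKeysLt_insert _ hey) (pvKeysLt_succ hmo) (pvKeysLt_succ hli) (pvKeysLt_succ hpu) (pvKeysLt_succ hea)]
      rw [PySem.Dict.items_insert_of_not_contains _ _ (pvNotContains hey)]
      rw [PySem.List.enumerate_cons]
      simp [pvF, List.append_assoc, show ¬(0 ≤ n ∧ n < 17) by omega, show ¬(17 ≤ n ∧ n < 27) by omega, show ¬(27 ≤ n ∧ n < 36) by omega, show (36 ≤ n ∧ n < 48) ∨ (80 ≤ n ∧ n < 104) by omega, show ¬(48 ≤ n ∧ n < 61) by omega, show ¬(61 ≤ n ∧ n < 68) by omega, show ¬(68 ≤ n ∧ n < 76) by omega, show ¬(76 ≤ n ∧ n < 80) by omega]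
    by_cases h4 : n < 61
    · simp only [pdLoopA]
      rw [if_neg h0, if_neg h1, if_neg h2, if_neg h3, if_pos h4]
      rw [ih (n+1) (by omega) c eb no_ ey (mo.insert n (pvPt q)) li pu ea (pvKeysLt_succ hc) (pvKeysLt_succ heb) (pvKeysLt_succ hno_) (pvKeysLt_succ hey) (pvKeysLt_insert _ hmo) (pvKeysLt_succ hli) (pvKeysLt_succ hpu) (pvKeysLt_succ hea)]
      rw [PySem.Dict.items_insert_of_not_contains _ _ (pvNotContains hmo)]
      rw [PySem.List.enumerate_cons]
      simp [pvF, List.append_assoc, show ¬(0 ≤ n ∧ n < 17) by omega, show ¬(17 ≤ n ∧ n < 27) by omega, show ¬(27 ≤ n ∧ n < 36) by omega, show ¬((36 ≤ n ∧ n < 48) ∨ (80 ≤ n ∧ n < 104)) by omega, show 48 ≤ n ∧ n < 61 by omega, show ¬(61 ≤ n ∧ n < 68) by omega, show ¬(68 ≤ n ∧ n < 76) by omega, show ¬(76 ≤ n ∧ n < 80) by omega]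
    by_cases h5 : n < 68
    · simp only [pdLoopA]
      rw [if_neg h0, if_neg h1, if_neg h2, if_neg h3, if_neg h4, if_pos h5]
      rw [ih (n+1) (by omega) c eb no_ ey mo (li.insert n (pvPt q)) pu ea (pvKeysLt_succ hc) (pvKeysLt_succ heb) (pvKeysLt_succ hno_) (pvKeysLt_succ hey) (pvKeysLt_succ hmo) (pvKeysLt_insert _ hli) (pvKeysLt_succ hpu) (pvKeysLt_succ hea)]
      rw [PySem.Dict.items_insert_of_not_contains _ _ (pvNotContains hli)]
      rw [PySem.List.enumerate_cons]
      simp [pvF, List.append_assoc, show ¬(0 ≤ n ∧ n < 17) by omega, show ¬(17 ≤ n ∧ n < 27) by omega, show ¬(27 ≤ n ∧ n < 36) by omega, show ¬((36 ≤ n ∧ n < 48) ∨ (80 ≤ n ∧ n < 104)) by omega, show ¬(48 ≤ n ∧ n < 61) by omega, show 61 ≤ n ∧ n < 68 by omega, show ¬(68 ≤ n ∧ n < 76) by omega, show ¬(76 ≤ n ∧ n < 80) by omega]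
    by_cases h6 : n < 76
    · simp only [pdLoopA]
      rw [if_neg h0, if_neg h1, if_neg h2, if_neg h3, if_neg h4, if_neg h5, if_pos h6]
      rw [ih (n+1) (by omega) c eb no_ ey mo li (pu.insert n (pvPt q)) ea (pvKeysLt_succ hc) (pvKeysLt_succ heb) (pvKeysLt_succ hno_) (pvKeysLt_succ hey) (pvKeysLt_succ hmo) (pvKeysLt_succ hli) (pvKeysLt_insert _ hpu) (pvKeysLt_succ hea)]
      rw [PySem.Dict.items_insert_of_not_contains _ _ (pvNotContains hpu)]
      rw [PySem.List.enumerate_cons]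
      simp [pvF, List.append_assoc, show ¬(0 ≤ n ∧ n < 17) by omega, show ¬(17 ≤ n ∧ n < 27) by omega, show ¬(27 ≤ n ∧ n < 36) by omega, show ¬((36 ≤ n ∧ n < 48) ∨ (80 ≤ n ∧ n < 104)) by omega, show ¬(48 ≤ n ∧ n < 61) by omega, show ¬(61 ≤ n ∧ n < 68) by omega, show 68 ≤ n ∧ n < 76 by omega, show ¬(76 ≤ n ∧ n < 80) by omega]
    by_cases h7 : n < 80
    · simp only [pdLoopA]
      rw [if_neg h0, if_neg h1, if_neg h2, if_neg h3, if_neg h4, if_neg h5, if_neg h6, if_pos h7]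
      rw [ih (n+1) (by omega) c eb no_ ey mo li pu (ea.insert n (pvPt q)) (pvKeysLt_succ hc) (pvKeysLt_succ heb) (pvKeysLt_succ hno_) (pvKeysLt_succ hey) (pvKeysLt_succ hmo) (pvKeysLt_succ hli) (pvKeysLt_succ hpu) (pvKeysLt_insert _ hea)]
      rw [PySem.Dict.items_insert_of_not_contains _ _ (pvNotContains hea)]
      rw [PySem.List.enumerate_cons]
      simp [pvF, List.append_assoc, show ¬(0 ≤ n ∧ n < 17) by omega, show ¬(17 ≤ n ∧ n < 27) by omega, show ¬(27 ≤ n ∧ n < 36) by omega, show ¬((36 ≤ n ∧ n < 48) ∨ (80 ≤ n ∧ n < 104)) by omega, show ¬(48 ≤ n ∧ n < 61) by omega, show ¬(61 ≤ n ∧ n < 68) by omega, show ¬(68 ≤ n ∧ n < 76) by omega, show 76 ≤ n ∧ n < 80 by omega]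
    by_cases h8 : n < 104
    · simp only [pdLoopA]
      rw [if_neg h0, if_neg h1, if_neg h2, if_neg h3, if_neg h4, if_neg h5, if_neg h6, if_neg h7, if_pos h8]
      rw [ih (n+1) (by omega) c eb no_ (ey.insert n (pvPt q)) mo li pu ea (pvKeysLt_succ hc) (pvKeysLt_succ heb) (pvKeysLt_succ hno_) (pvKeysLt_insert _ hey) (pvKeysLt_succ hmo) (pvKeysLt_succ hli) (pvKeysLt_succ hpu) (pvKeysLt_succ hea)]
      rw [PySem.Dict.items_insert_of_not_contains _ _ (pvNotContains hey)]
      rw [PySem.List.enumerate_cons]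
      simp [pvF, List.append_assoc, show ¬(0 ≤ n ∧ n < 17) by omega, show ¬(17 ≤ n ∧ n < 27) by omega, show ¬(27 ≤ n ∧ n < 36) by omega, show (36 ≤ n ∧ n < 48) ∨ (80 ≤ n ∧ n < 104) by omega, show ¬(48 ≤ n ∧ n < 61) by omega, show ¬(61 ≤ n ∧ n < 68) by omega, show ¬(68 ≤ n ∧ n < 76) by omega, show ¬(76 ≤ n ∧ n < 80) by omega]
    · simp only [pdLoopA]
      rw [if_neg h0, if_neg h1, if_neg h2, if_neg h3, if_neg h4, if_neg h5, if_neg h6, if_neg h7, if_neg h8]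
      rw [ih (n+1) (by omega) c eb no_ ey mo li pu ea (pvKeysLt_succ hc) (pvKeysLt_succ heb) (pvKeysLt_succ hno_) (pvKeysLt_succ hey) (pvKeysLt_succ hmo) (pvKeysLt_succ hli) (pvKeysLt_succ hpu) (pvKeysLt_succ hea)]
      rw [PySem.List.enumerate_cons]
      simp [show ¬(0 ≤ n ∧ n < 17) by omega, show ¬(17 ≤ n ∧ n < 27) by omega, show ¬(27 ≤ n ∧ n < 36) by omega, show ¬((36 ≤ n ∧ n < 48) ∨ (80 ≤ n ∧ n < 104)) by omega, show ¬(48 ≤ n ∧ n < 61) by omega, show ¬(61 ≤ n ∧ n < 68) by omega, show ¬(68 ≤ n ∧ n < 76) by omega, show ¬(76 ≤ n ∧ n < 80) by omega]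

-- B side: filtering an enumeration by an upper index bound is enumerating a take …
lemma pvEnumFilterLt (pts : List (Int × Int)) (hi : Int) : ∀ (s : Int),
    (PySem.List.enumerate pts s).filter (fun p => decide (p.1 < hi)) =
    PySem.List.enumerate (pts.take (hi - s).toNat) s := by
  induction pts with
  | nil => intro s; simp [PySem.List.enumerate_nil]
  | cons c rest ih =>
    intro s
    rw [PySem.List.enumerate_cons]
    by_cases h : s < hi
    · have ht : (hi - s).toNat = (hi - (s + 1)).toNat + 1 := by omega
      rw [ht, List.take_succ_cons, PySem.List.enumerate_cons, List.filter_cons]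
      simp only [decide_eq_true_eq]
      rw [if_pos h, ih (s + 1)]
    · have ht : (hi - s).toNat = 0 := by omega
      have ht' : (hi - (s + 1)).toNat = 0 := by omega
      rw [ht, List.take_zero, List.filter_cons]
      simp only [decide_eq_true_eq]
      rw [if_neg h, ih (s + 1), ht', List.take_zero]
      simp [PySem.List.enumerate_nil]

-- … and filtering by a lower bound the whole enumeration already satisfies is the identity …
lemma pvEnumFilterGeAll (pts : List (Int × Int)) (lo : Int) : ∀ (s : Int), lo ≤ s →
    (PySem.List.enumerate pts s).filter (fun p => decide (lo ≤ p.1)) =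
    PySem.List.enumerate pts s := by
  induction pts with
  | nil => intro s _; simp [PySem.List.enumerate_nil]
  | cons c rest ih =>
    intro s hs
    rw [PySem.List.enumerate_cons, List.filter_cons]
    simp only [decide_eq_true_eq]
    rw [if_pos hs, ih (s + 1) (by omega)]

-- … while filtering by a lower index bound is enumerating a drop, restarted at that bound.
lemma pvEnumFilterGe (pts : List (Int × Int)) (lo : Int) : ∀ (s : Int), s ≤ lo →
    (PySem.List.enumerate pts s).filter (fun p => decide (lo ≤ p.1)) =
    PySem.List.enumerate (pts.drop (lo - s).toNat) lo := by
  induction pts with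
  | nil => intro s _; simp [PySem.List.enumerate_nil]
  | cons c rest ih =>
    intro s hs
    rw [PySem.List.enumerate_cons]
    by_cases h : s < lo
    · have ht : (lo - s).toNat = (lo - (s + 1)).toNat + 1 := by omega
      rw [ht, List.drop_succ_cons, List.filter_cons]
      simp only [decide_eq_true_eq]
      rw [if_neg (by omega), ih (s + 1) (by omega)]
    · have hse : s = lo := by omega
      subst hse
      have ht : (s - s).toNat = 0 := by omega
      rw [ht, List.drop_zero, List.filter_cons]
      simp only [decide_eq_true_eq]
      rw [if_pos (le_refl s), pvEnumFilterGeAll rest s (s + 1) (by omega),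
          PySem.List.enumerate_cons]

-- B's comprehension re-offsets enumerate-from-0 by lo; that is enumerate-from-lo.
lemma pvMapShift (xs : List (Int × Int)) (lo : Int) : ∀ (s : Int),
    (PySem.List.enumerate xs s).map (fun p => (lo + p.1, pvPtB p.2)) =
    (PySem.List.enumerate xs (lo + s)).map pvF := by
  induction xs with
  | nil => intro s; simp [PySem.List.enumerate_nil]
  | cons c rest ih =>
    intro s
    rw [PySem.List.enumerate_cons, PySem.List.enumerate_cons, List.map_cons, List.map_cons,
        ih (s + 1), show lo + (s + 1) = lo + s + 1 by omega]
    rfl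

lemma pvUpdateItems {ν : Type} (l : List (Int × ν)) (d : PySem.Dict Int ν)
    (h : (d.keys ++ l.map Prod.fst).Nodup) :
    (d.update l).items = d.items ++ l := by
  induction l generalizing d with
  | nil => simp [PySem.Dict.update]
  | cons p rest ih =>
    have hnc : d.contains p.1 = false := by
      have hdisj := List.disjoint_of_nodup_append h
      rw [Bool.eq_false_iff]
      intro hc
      exact hdisj ((PySem.Dict.contains_iff_mem_keys d p.1).1 hc) (by simp)
    have hitems := PySem.Dict.items_insert_of_not_contains d p.2 hnc
    have hstep : d.update (p :: rest) = (d.insert p.1 p.2).update rest := by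
      simp [PySem.Dict.update]
    rw [hstep, ih]
    · rw [hitems]; simp
    · have hkeys : (d.insert p.1 p.2).keys = d.keys ++ [p.1] := by
        simp [PySem.Dict.keys, hitems]
      rw [hkeys]
      simpa [List.append_assoc] using h

lemma pvItemsOfList {ν : Type} (l : List (Int × ν)) (h : (l.map Prod.fst).Nodup) :
    (PySem.Dict.ofList l).items = l := by
  have := pvUpdateItems l PySem.Dict.empty (by simpa [PySem.Dict.keys_empty] using h)
  simpa [PySem.Dict.ofList, PySem.Dict.empty] using this

lemma pvNodupFst (l : List (Int × (Int × Int))) (hl : l.Pairwise (fun p q => p.1 < q.1))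
    (q : Int × (Int × Int) → Bool) :
    (((l.filter q).map pvF).map Prod.fst).Nodup := by
  have hmap : ((l.filter q).map pvF).map Prod.fst = (l.filter q).map Prod.fst := by
    simp [pvF]
  rw [hmap]
  have : ((l.filter q).map Prod.fst).Pairwise (· < ·) :=
    (List.pairwise_map).2 (hl.filter q)
  exact this.imp (fun h => ne_of_lt h)

-- The key B-side characterisation: region(lo, hi)'s items ARE the window filter of A's enumeration.
lemma pvRegionEq (pts : List (Int × Int)) (lo hi : Nat) :
    (pvRegion pts (lo : Int) (hi : Int)).items =
    ((PySem.List.enumerate pts 0).filter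
      (fun p => decide ((lo : Int) ≤ p.1 ∧ p.1 < (hi : Int)))).map pvF := by
  have hfilt : (PySem.List.enumerate pts 0).filter
      (fun p => decide ((lo : Int) ≤ p.1 ∧ p.1 < (hi : Int))) =
      ((PySem.List.enumerate pts 0).filter (fun p => decide (p.1 < (hi : Int)))).filter
        (fun p => decide ((lo : Int) ≤ p.1)) := by
    rw [List.filter_filter]
    simp [Bool.decide_and]
  have hchain : (PySem.List.enumerate pts 0).filter
      (fun p => decide ((lo : Int) ≤ p.1 ∧ p.1 < (hi : Int))) =
      PySem.List.enumerate ((pts.take hi).drop lo) (lo : Int) := by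
    rw [hfilt, pvEnumFilterLt pts (hi : Int) 0, pvEnumFilterGe _ (lo : Int) 0 (by omega),
        show (((hi : Int)) - 0).toNat = hi by omega, show (((lo : Int)) - 0).toNat = lo by omega]
  have hL : (PySem.List.enumerate (PySem.List.slice pts (some (lo : Int)) (some (hi : Int))) 0).map
      (fun p => ((lo : Int) + p.1, pvPtB p.2)) =
      ((PySem.List.enumerate pts 0).filter
        (fun p => decide ((lo : Int) ≤ p.1 ∧ p.1 < (hi : Int)))).map pvF := by
    rw [PySem.List.slice_natCast, ← List.drop_take, pvMapShift _ (lo : Int) 0, add_zero, ← hchain]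
  unfold pvRegion
  rw [hL]
  exact pvItemsOfList _ (pvNodupFst _ (PySem.List.pairwise_lt_enumerate pts 0) _)

lemma pvFilterOrSplit (l : List (Int × (Int × Int))) (hl : l.Pairwise (fun p q => p.1 < q.1)) :
    l.filter (fun p => decide ((36 ≤ p.1 ∧ p.1 < 48) ∨ (80 ≤ p.1 ∧ p.1 < 104))) =
    l.filter (fun p => decide (36 ≤ p.1 ∧ p.1 < 48)) ++ l.filter (fun p => decide (80 ≤ p.1 ∧ p.1 < 104)) := by
  induction l with
  | nil => simp
  | cons a t ih =>
    rcases List.pairwise_cons.1 hl with ⟨ha, ht⟩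
    simp only [List.filter_cons, decide_eq_true_eq]
    by_cases h1 : 36 ≤ a.1 ∧ a.1 < 48
    · rw [if_pos (Or.inl h1), if_pos h1, if_neg (show ¬(80 ≤ a.1 ∧ a.1 < 104) by omega)]
      rw [ih ht]
      simp
    · by_cases h2 : 80 ≤ a.1 ∧ a.1 < 104
      · have hf1 : List.filter (fun p => decide (36 ≤ p.1 ∧ p.1 < 48)) t = [] := by
          rw [List.filter_eq_nil_iff]
          intro p hp
          have := ha p hp
          simp only [decide_eq_true_eq]
          omega
        rw [if_pos (Or.inr h2), if_neg h1, if_pos h2, ih ht, hf1]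
        simp
      · rw [if_neg (show ¬((36 ≤ a.1 ∧ a.1 < 48) ∨ (80 ≤ a.1 ∧ a.1 < 104)) by tauto),
            if_neg h1, if_neg h2]
        exact ih ht

lemma pvEmptyKeysLt (n : Int) :
    ∀ k ∈ (PySem.Dict.empty : PySem.Dict Int (List (String × Int))).keys, k < n := by
  intro k hk
  simp [PySem.Dict.keys_empty] at hk

theorem parse_descriptors_spec : Claim_equal_parse_descriptors := by
  intro pts _
  unfold Spec_parse_descriptors parse_descriptors parse_descriptors_alt
  rw [pvLoopA_eq pts 0 (by omega) _ _ _ _ _ _ _ _ (pvEmptyKeysLt 0) (pvEmptyKeysLt 0) (pvEmptyKeysLt 0)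
      (pvEmptyKeysLt 0) (pvEmptyKeysLt 0) (pvEmptyKeysLt 0) (pvEmptyKeysLt 0) (pvEmptyKeysLt 0)]
  have hpw := PySem.List.pairwise_lt_enumerate pts 0
  have r0 := pvRegionEq pts 0 17
  have r17 := pvRegionEq pts 17 27
  have r27 := pvRegionEq pts 27 36
  have r36 := pvRegionEq pts 36 48
  have r48 := pvRegionEq pts 48 61
  have r61 := pvRegionEq pts 61 68
  have r68 := pvRegionEq pts 68 76
  have r76 := pvRegionEq pts 76 80
  have r80 := pvRegionEq pts 80 104
  simp only [Nat.cast_ofNat, Nat.cast_zero] at r0 r17 r27 r36 r48 r61 r68 r76 r80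
  -- eyes: update of region(36,48) by region(80,104)'s items appends (keys disjoint)
  have hnd := pvNodupFst _ hpw
  have heyes : ((pvRegion pts 36 48).update (pvRegion pts 80 104).items).items =
      ((PySem.List.enumerate pts 0).filter (fun p => decide (36 ≤ p.1 ∧ p.1 < 48))).map pvF
      ++ ((PySem.List.enumerate pts 0).filter (fun p => decide (80 ≤ p.1 ∧ p.1 < 104))).map pvF := by
    rw [r80]
    rw [pvUpdateItems _ _ ?_, r36]
    have hk : (pvRegion pts 36 48).keys =
        (((PySem.List.enumerate pts 0).filter (fun p => decide (36 ≤ p.1 ∧ p.1 < 48))).map pvF).map Prod.fst := by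
      simp only [PySem.Dict.keys, r36]
    rw [hk, List.nodup_append]
    refine ⟨hnd _, ?_, ?_⟩
    · have := hnd (fun p => decide (80 ≤ p.1 ∧ p.1 < 104))
      simpa [List.map_map] using this
    · intro x hx y hy
      simp only [List.map_map, List.mem_map, Function.comp, List.mem_filter,
        decide_eq_true_eq, pvF] at hx hy
      obtain ⟨p, ⟨hpm, hp⟩, hpe⟩ := hx
      obtain ⟨p', ⟨hpm', hp'⟩, hpe'⟩ := hy
      omega
  rw [pvFilterOrSplit _ hpw, List.map_append]
  rw [r0, r17, r27, heyes, r48, r61, r68, r76]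
  simp [PySem.Dict.empty]
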